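-- pv_equiv track=rewrite | github.com/mcjcode/number-theory | bps.py | bps_facts_w_rep_powerful2
-- ===== SOURCE A (Python) =====
-- def bps_facts_w_rep_powerful2(n, ps, i, sofar):
--     """
--     Set sofar to []
--     """
--     if len(ps) == i:  # we're out of primes
--         yield sofar
--         return
--     p = ps[i]
--     pk = 1
--     e = 0
--     while pk <= n:
--         for pr in bps_facts_w_rep_powerful2(n//pk, ps, i+1, sofar+([(p, i, e, n//pk)] if e else [])):
--             yield pr
--         pk *= p
--         e += 1
-- ===== SOURCE B (Python) =====
-- def bps_facts_w_rep_powerful2(n, ps, i, sofar):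
--     # Iterative generator: an explicit work-list of (remaining, index, acc) states
--     # replaces the nested recursive generators; children are pushed in reverse
--     # exponent order so pop order reproduces the original depth-first sequence.
--     stack = [(n, i, sofar)]
--     while stack:
--         m, j, acc = stack.pop()
--         if j == len(ps):
--             yield acc
--             continue
--         p = ps[j]
--         children = []
--         pk = 1
--         e = 0
--         while pk <= m:
--             children.append((m // pk, j + 1, acc + ([(p, j, e, m // pk)] if e else [])))
--             pk *= p
--             e += 1
--         stack.extend(reversed(children))
-- ===== Notes on version B (the rewrite author's own statement) =====
-- stated objective: alternative
-- what changed: Replaces the nested recursive generators with an iterative generator driven by an explicit work-list of (remaining, index, sofar) states, pushing child states in reverse exponent order so pops reproduce the original depth-first yield order.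
import Mathlib
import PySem

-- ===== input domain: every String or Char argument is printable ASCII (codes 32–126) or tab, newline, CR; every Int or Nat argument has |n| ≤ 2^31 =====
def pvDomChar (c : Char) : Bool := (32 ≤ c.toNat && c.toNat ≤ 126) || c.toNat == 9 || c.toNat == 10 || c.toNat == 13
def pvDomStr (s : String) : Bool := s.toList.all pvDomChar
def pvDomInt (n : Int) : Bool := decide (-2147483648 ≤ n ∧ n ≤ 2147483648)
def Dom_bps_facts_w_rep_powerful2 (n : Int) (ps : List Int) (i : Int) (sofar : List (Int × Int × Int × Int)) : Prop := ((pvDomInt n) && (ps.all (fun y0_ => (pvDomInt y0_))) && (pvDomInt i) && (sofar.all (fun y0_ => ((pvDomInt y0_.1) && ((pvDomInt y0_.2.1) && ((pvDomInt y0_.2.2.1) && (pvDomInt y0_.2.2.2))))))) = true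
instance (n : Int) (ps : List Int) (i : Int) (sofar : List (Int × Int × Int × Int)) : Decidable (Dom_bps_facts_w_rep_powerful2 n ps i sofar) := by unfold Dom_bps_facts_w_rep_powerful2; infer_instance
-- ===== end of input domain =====

-- B replaces the nested recursive generators by an explicit work-list (stack) of
-- (remaining, index, acc) states popped depth-first; same yielded sequence (objective: alternative).


-- ===== PORT A =====

-- helper used by the port for termination: a successful ps[i] implies i < len(ps)
theorem pv_lt_of_pyGet?_some {α : Type} (xs : List α) (i : Int) (x : α)
    (h : PySem.List.pyGet? xs i = some x) : i < (xs.length : Int) := by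
  by_contra hge
  have hn : PySem.List.pyGet? xs i = none := by
    rw [PySem.List.pyGet?_eq_none_iff]
    intro hin
    rcases hin with ⟨_, h2⟩
    omega
  rw [hn] at h
  simp at h

mutual
-- literal port of A; the generator's yields are collected into a list.
-- The `none` branch is Python's IndexError (excluded by Pre_); the inner `while` loop
-- carries fuel 40 only to be total (on Dom, |n| ≤ 2^31 and Pre_ it is never exhausted).
def bps_facts_w_rep_powerful2 (n : Int) (ps : List Int) (i : Int) (sofar : List (Int × Int × Int × Int)) : List (List (Int × Int × Int × Int)) :=
  if (ps.length : Int) = i then [sofar]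
  else
    match h : PySem.List.pyGet? ps i with
    | none => []
    | some p => pvLoopA n ps i sofar p 1 0 40 (pv_lt_of_pyGet?_some ps i p h)
termination_by (((ps.length : Int) + 1 - i).toNat, 41)
decreasing_by apply Prod.Lex.right; omega

-- the `while pk <= n` loop of A: yield the recursive results, then pk *= p; e += 1
def pvLoopA (n : Int) (ps : List Int) (i : Int) (sofar : List (Int × Int × Int × Int))
    (p pk e : Int) (fuel : Nat) (hi : i < (ps.length : Int)) : List (List (Int × Int × Int × Int)) :=
  match fuel with
  | 0 => []
  | f+1 =>
    if pk ≤ n then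
      bps_facts_w_rep_powerful2 (PySem.Int.floordiv n pk) ps (i+1)
        (sofar ++ (if e ≠ 0 then [(p, i, e, PySem.Int.floordiv n pk)] else []))
      ++ pvLoopA n ps i sofar p (pk*p) (e+1) f hi
    else []
termination_by (((ps.length : Int) + 1 - i).toNat, fuel)
decreasing_by
  · apply Prod.Lex.left; omega
  · apply Prod.Lex.right; omega
end

-- ===== PORT B =====

-- the inner `while pk <= m` loop of B: build the list of child states
-- (fuel 40 only for totality, as in port A)
def pvChildrenB (ps : List Int) (m j : Int) (acc : List (Int × Int × Int × Int))
    (p pk e : Int) (fuel : Nat) : List (Int × Int × List (Int × Int × Int × Int)) :=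
  match fuel with
  | 0 => []
  | f+1 =>
    if pk ≤ m then
      (PySem.Int.floordiv m pk, j+1, acc ++ (if e ≠ 0 then [(p, j, e, PySem.Int.floordiv m pk)] else []))
        :: pvChildrenB ps m j acc p (pk*p) (e+1) f
    else []

-- termination measure of the work-list loop
def pvWeight (ps : List Int) (s : Int × Int × List (Int × Int × Int × Int)) : Nat :=
  41 ^ (((ps.length : Int) + 1 - s.2.1).toNat)

theorem pvChildrenB_wsum (ps : List Int) (m j : Int) (acc : List (Int × Int × Int × Int))
    (p : Int) (fuel : Nat) : ∀ pk e : Int,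
    ((pvChildrenB ps m j acc p pk e fuel).map (pvWeight ps)).sum
      ≤ fuel * 41 ^ (((ps.length : Int) + 1 - (j+1)).toNat) := by
  induction fuel with
  | zero => intro pk e; simp [pvChildrenB]
  | succ f ih =>
    intro pk e
    rw [pvChildrenB]
    split
    · have hS := ih (pk*p) (e+1)
      simp only [List.map_cons, List.sum_cons, pvWeight, Nat.succ_mul]
      omega
    · simp

-- the `while stack` loop of B, stack head = top (python append = cons, pop = head,
-- extend(reversed(children)) = children ++ stack); `none` is Python's IndexError (excluded by Pre_)
def pvStackLoop (ps : List Int) (stack : List (Int × Int × List (Int × Int × Int × Int))) : List (List (Int × Int × Int × Int)) :=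
  match stack with
  | [] => []
  | (m, j, acc) :: rest =>
    if (ps.length : Int) = j then acc :: pvStackLoop ps rest
    else
      match h : PySem.List.pyGet? ps j with
      | none => pvStackLoop ps rest
      | some p => pvStackLoop ps (pvChildrenB ps m j acc p 1 0 40 ++ rest)
termination_by (stack.map (pvWeight ps)).sum
decreasing_by
  · have : 0 < pvWeight ps (m, j, acc) := pow_pos (by norm_num : (0:Nat) < 41) _
    simp only [List.map_cons, List.sum_cons]; omega
  · have : 0 < pvWeight ps (m, j, acc) := pow_pos (by norm_num : (0:Nat) < 41) _
    simp only [List.map_cons, List.sum_cons]; omega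
  · have hj : j < (ps.length : Int) := pv_lt_of_pyGet?_some ps j p h
    have hc := pvChildrenB_wsum ps m j acc p 40 1 0
    have hd : (((ps.length : Int) + 1 - j).toNat) = (((ps.length : Int) + 1 - (j+1)).toNat) + 1 := by omega
    have hpos : 0 < 41 ^ (((ps.length : Int) + 1 - (j+1)).toNat) := pow_pos (by norm_num : (0:Nat) < 41) _
    simp only [List.map_append, List.sum_append, List.map_cons, List.sum_cons, pvWeight, hd, pow_succ]
    omega

def bps_facts_w_rep_powerful2_alt (n : Int) (ps : List Int) (i : Int) (sofar : List (Int × Int × Int × Int)) : List (List (Int × Int × Int × Int)) :=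
  pvStackLoop ps [(n, i, sofar)]

-- ===== PRECONDITION & SPEC =====
-- Pre_ = exactly the inputs where Python A returns: i a valid (possibly negative) index or len(ps),
-- and, unless n ≤ 0 (the loop never runs), every prime actually reachable (ps[i:], or all of ps when
-- i < 0, since negative indices wrap and the recursion then revisits the whole list) has |p| ≥ 2;
-- otherwise A raises IndexError/ZeroDivisionError or loops forever.
def Pre_bps_facts_w_rep_powerful2 (n : Int) (ps : List Int) (i : Int) (sofar : List (Int × Int × Int × Int)) : Prop :=
  -(ps.length : Int) ≤ i ∧ i ≤ (ps.length : Int) ∧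
    (n ≤ 0 ∨ ∀ p ∈ ps.drop i.toNat, p ≤ -2 ∨ 2 ≤ p)
instance (n : Int) (ps : List Int) (i : Int) (sofar : List (Int × Int × Int × Int)) : Decidable (Pre_bps_facts_w_rep_powerful2 n ps i sofar) := by unfold Pre_bps_facts_w_rep_powerful2; infer_instance

def pvWitness_bps_facts_w_rep_powerful2 : Int × List Int × Int × (List (Int × Int × Int × Int)) := (12, [2, 3], 0, [])

def Spec_bps_facts_w_rep_powerful2 (n : Int) (ps : List Int) (i : Int) (sofar : List (Int × Int × Int × Int)) (out : List (List (Int × Int × Int × Int))) : Prop := out = bps_facts_w_rep_powerful2_alt n ps i sofar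
instance (n : Int) (ps : List Int) (i : Int) (sofar : List (Int × Int × Int × Int)) (out : List (List (Int × Int × Int × Int))) : Decidable (Spec_bps_facts_w_rep_powerful2 n ps i sofar out) := by unfold Spec_bps_facts_w_rep_powerful2; infer_instance

-- ===== CLAIM (what is proved, stated in full; the proofs are below) =====
def Claim_equal_bps_facts_w_rep_powerful2 : Prop := ∀ (n : Int) (ps : List Int) (i : Int) (sofar : List (Int × Int × Int × Int)), Dom_bps_facts_w_rep_powerful2 n ps i sofar → Pre_bps_facts_w_rep_powerful2 n ps i sofar → Spec_bps_facts_w_rep_powerful2 n ps i sofar (bps_facts_w_rep_powerful2 n ps i sofar)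

-- ===== LEMMAS AND PROOFS =====

-- A's while loop = flat-map of A's recursion over B's child-state list
theorem pvLoopA_eq (n : Int) (ps : List Int) (i : Int) (sofar : List (Int × Int × Int × Int))
    (p : Int) (fuel : Nat) (hi : i < (ps.length : Int)) : ∀ pk e : Int,
    pvLoopA n ps i sofar p pk e fuel hi
      = ((pvChildrenB ps n i sofar p pk e fuel).map
          (fun s => bps_facts_w_rep_powerful2 s.1 ps s.2.1 s.2.2)).flatten := by
  induction fuel with
  | zero => intro pk e; simp [pvLoopA, pvChildrenB]
  | succ f ih =>
    intro pk e
    rw [pvLoopA, pvChildrenB]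
    split
    · simp only [List.map_cons, List.flatten_cons]
      rw [ih (pk*p) (e+1)]
    · simp

-- the work list computes the concatenation of A's results over its states
theorem pvStackLoop_eq (ps : List Int) (stack : List (Int × Int × List (Int × Int × Int × Int))) :
    pvStackLoop ps stack
      = (stack.map (fun s => bps_facts_w_rep_powerful2 s.1 ps s.2.1 s.2.2)).flatten := by
  fun_induction pvStackLoop ps stack with
  | case1 => simp
  | case2 m acc rest ih =>
    simp only [List.map_cons, List.flatten_cons, ih]
    rw [bps_facts_w_rep_powerful2.eq_def, if_pos rfl]
    simp
  | case3 m j acc rest hne h ih =>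
    simp only [List.map_cons, List.flatten_cons, ih]
    rw [bps_facts_w_rep_powerful2.eq_def, if_neg hne]
    split <;> rename_i h' <;> rw [h'] at h
    · simp
    · exact absurd h (by simp)
  | case4 m j acc rest hne p h ih =>
    rw [ih, List.map_append, List.flatten_append]
    simp only [List.map_cons, List.flatten_cons]
    congr 1
    rw [bps_facts_w_rep_powerful2.eq_def, if_neg hne]
    split <;> rename_i h' <;> rw [h'] at h
    · exact absurd h (by simp)
    · cases Option.some.inj h
      rw [pvLoopA_eq]

-- ===== VERDICT (by name: the statement is the Claim_ definition above) =====
theorem bps_facts_w_rep_powerful2_spec : Claim_equal_bps_facts_w_rep_powerful2 := by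
  intro n ps i sofar _ _
  unfold Spec_bps_facts_w_rep_powerful2 bps_facts_w_rep_powerful2_alt
  rw [pvStackLoop_eq]
  simp
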